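-- pv_equiv track=rewrite | github.com/MadanReddy6/DSA | sorting/FindMinimuminRotatedSortedArray.py | findMinOptimal
-- ===== SOURCE A (Python) =====
-- def findMinOptimal(arr):
--     """
--     Finds the minimum element in a rotated sorted array using binary search.
--
--     Args:
--         arr (list): The input list of numbers, which is a rotated sorted array.
--                     Assumes distinct elements.
--
--     Returns:
--         int: The minimum element in the array.
--
--     Time Complexity: O(log n)
--     Space Complexity: O(1)
--     """
--     left, right = 0, len(arr) - 1
--
--     while left < right:
--         mid = (left + right) // 2
--
--         if arr[mid] > arr[right]:
--             left = mid + 1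
--         else:
--             right = mid
--
--     return arr[left]
-- ===== SOURCE B (Python) =====
-- def findMinOptimal(arr):
--     """Recursive binary search on shrinking subarrays (slices) instead of an
--     index-pair loop; same comparisons, so it matches A on every input."""
--     if len(arr) == 1:
--         return arr[0]
--     mid = (len(arr) - 1) // 2
--     if arr[mid] > arr[-1]:
--         return findMinOptimal(arr[mid + 1:])
--     return findMinOptimal(arr[:mid + 1])
-- ===== Notes on version B (the rewrite author's own statement) =====
-- stated objective: alternative
-- what changed: Index-pair while-loop replaced by a recursive binary search that recurses on slices of the array (arr[mid+1:] / arr[:mid+1]) with no index state at all.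
-- outside the precondition, e.g. on findMinOptimal([]): A raises IndexError, B raises IndexError
import Mathlib
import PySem

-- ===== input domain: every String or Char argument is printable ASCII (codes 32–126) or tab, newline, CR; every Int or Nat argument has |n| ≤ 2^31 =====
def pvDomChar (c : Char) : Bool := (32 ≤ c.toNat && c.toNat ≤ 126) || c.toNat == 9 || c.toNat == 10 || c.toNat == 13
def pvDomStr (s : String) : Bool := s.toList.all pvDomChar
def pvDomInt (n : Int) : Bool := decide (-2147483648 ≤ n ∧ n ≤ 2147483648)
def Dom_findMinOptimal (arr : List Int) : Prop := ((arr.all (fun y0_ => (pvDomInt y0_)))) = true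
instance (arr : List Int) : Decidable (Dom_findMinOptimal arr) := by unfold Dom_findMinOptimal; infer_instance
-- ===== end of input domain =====

-- B replaces A's index-pair while-loop by a recursive binary search on slices of the array (alternative decomposition; same comparisons, same result).

-- ===== PORT A =====
-- A's while-loop. left/right are Python ints but always stay in 0..len(arr)-1,
-- so Nat indices and Nat '/' (= floor on nonnegatives) are exact; on the admitted
-- inputs (arr ≠ []) every access arr[mid]/arr[right]/arr[left] is in range, so
-- getD is exact there.
def findMinOptimalLoop (arr : List Int) (left right : Nat) : Int :=
  if _h : left < right then
    let mid := (left + right) / 2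
    if arr.getD mid 0 > arr.getD right 0 then
      findMinOptimalLoop arr (mid + 1) right
    else
      findMinOptimalLoop arr left mid
  else
    arr.getD left 0
termination_by right - left
decreasing_by all_goals omega

def findMinOptimal (arr : List Int) : Int :=
  findMinOptimalLoop arr 0 (arr.length - 1)

-- ===== PORT B =====
-- Source B's recursion on slices: arr[mid+1:] = drop (mid+1), arr[:mid+1] = take (mid+1),
-- arr[-1] = getD (len-1) (in range for arr ≠ []). The 'length ≤ 1' guard (Python:
-- len == 1) only totalizes the empty case, which Pre_ excludes (Python raises there).
def findMinOptimal_alt (arr : List Int) : Int :=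
  if arr.length ≤ 1 then
    arr.getD 0 0
  else
    let mid := (arr.length - 1) / 2
    if arr.getD mid 0 > arr.getD (arr.length - 1) 0 then
      findMinOptimal_alt (arr.drop (mid + 1))
    else
      findMinOptimal_alt (arr.take (mid + 1))
termination_by arr.length
decreasing_by all_goals simp [List.length_drop, List.length_take]; omega

-- ===== PRECONDITION & SPEC =====
-- A raises IndexError on the empty list (arr[0] when the loop never runs); B raises there too. Excluded.
def Pre_findMinOptimal (arr : List Int) : Prop := arr ≠ []
instance (arr : List Int) : Decidable (Pre_findMinOptimal arr) := by unfold Pre_findMinOptimal; infer_instance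
def pvWitness_findMinOptimal : List Int := [4, 5, 1, 2, 3]

def Spec_findMinOptimal (arr : List Int) (out : Int) : Prop := out = findMinOptimal_alt arr
instance (arr : List Int) (out : Int) : Decidable (Spec_findMinOptimal arr out) := by unfold Spec_findMinOptimal; infer_instance

-- ===== CLAIM (what is proved, stated in full; the proofs are below) =====
def Claim_equal_findMinOptimal : Prop := ∀ (arr : List Int), Dom_findMinOptimal arr → Pre_findMinOptimal arr → Spec_findMinOptimal arr (findMinOptimal arr)

-- ===== LEMMAS AND PROOFS =====

-- getD of a take-of-drop window, for an in-range index
theorem getD_window (arr : List Int) (l k i : Nat) (hik : i < k) (_hi : l + i < arr.length) :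
    ((arr.drop l).take k).getD i 0 = arr.getD (l + i) 0 := by
  rw [List.getD_eq_getElem?_getD, List.getD_eq_getElem?_getD,
      List.getElem?_take_of_lt hik, List.getElem?_drop]

-- Key invariant: A's loop on the window [l, r] equals B's recursion on the slice arr[l : r+1].
theorem loop_eq_alt (arr : List Int) (l r : Nat) (hl : l ≤ r) (hr : r < arr.length) :
    findMinOptimalLoop arr l r = findMinOptimal_alt ((arr.drop l).take (r + 1 - l)) := by
  have hlen : ((arr.drop l).take (r + 1 - l)).length = r + 1 - l := by
    simp [List.length_take, List.length_drop]; omega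
  rw [findMinOptimalLoop, findMinOptimal_alt]
  by_cases h : l < r
  · rw [dif_pos h, if_neg (by omega : ¬ ((arr.drop l).take (r + 1 - l)).length ≤ 1)]
    have e1 : ((arr.drop l).take (r + 1 - l)).length - 1 = r - l := by omega
    have e2 : ((arr.drop l).take (r + 1 - l)).getD ((r - l) / 2) 0 = arr.getD ((l + r) / 2) 0 := by
      rw [getD_window arr l (r + 1 - l) ((r - l) / 2) (by omega) (by omega)]
      congr 1; omega
    have e3 : ((arr.drop l).take (r + 1 - l)).getD (r - l) 0 = arr.getD r 0 := by
      rw [getD_window arr l (r + 1 - l) (r - l) (by omega) (by omega)]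
      congr 1; omega
    simp only [e1, e2, e3, gt_iff_lt]
    by_cases hc : arr.getD r 0 < arr.getD ((l + r) / 2) 0
    · rw [if_pos hc, if_pos hc]
      rw [loop_eq_alt arr ((l + r) / 2 + 1) r (by omega) hr]
      rw [List.drop_take, List.drop_drop]
      have d1 : l + ((r - l) / 2 + 1) = (l + r) / 2 + 1 := by omega
      have d2 : r + 1 - l - ((r - l) / 2 + 1) = r + 1 - ((l + r) / 2 + 1) := by omega
      rw [d1, d2]
    · rw [if_neg hc, if_neg hc]
      rw [loop_eq_alt arr l ((l + r) / 2) (by omega) (by omega)]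
      rw [List.take_take]
      have d3 : min ((r - l) / 2 + 1) (r + 1 - l) = (l + r) / 2 + 1 - l := by omega
      rw [d3]
  · rw [dif_neg h]
    rw [if_pos (by omega : ((arr.drop l).take (r + 1 - l)).length ≤ 1)]
    rw [getD_window arr l (r + 1 - l) 0 (by omega) (by omega), Nat.add_zero]
termination_by r - l
decreasing_by all_goals omega

-- ===== VERDICT (by name: the statement is the Claim_ definition above) =====
theorem findMinOptimal_spec : Claim_equal_findMinOptimal := by
  intro arr _ hpre
  have hne : arr.length ≠ 0 := by
    simpa [List.length_eq_zero_iff] using hpre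
  unfold Spec_findMinOptimal findMinOptimal
  rw [loop_eq_alt arr 0 (arr.length - 1) (by omega) (by omega)]
  congr 1
  rw [List.drop_zero, List.take_of_length_le (by omega)]
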